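-- pv_equiv track=rewrite | github.com/Jamalvalli/Project_Flames | Relation.py | find_relation
-- ===== SOURCE A (Python) =====
-- def find_relation(length=0):
--     '''
--         Pass a number.
--         Return first letter of relation
--     '''
--     relation = [ 'F', 'L', 'A', 'M', 'E', 'S' ]
--     size = 6
--     for x in range(6):
--         if len(relation) is 1:
--             return relation[0]
--         else:
--             temp = length % (size-x)
--             if temp is 0:
--                 relation.pop()
--             elif temp is 1:
--                 relation.pop(0)
--             else:
--                 lst01 = relation[:temp-1]
--                 lst02 = relation[temp:]
--                 relation = lst02 + lst01
-- ===== SOURCE B (Python) =====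
-- def find_relation(length=0):
--     '''
--         Pass a number.
--         Return first letter of relation
--     '''
--     relation = ['F', 'L', 'A', 'M', 'E', 'S']
--     idx = 0
--     while len(relation) > 1:
--         idx = (idx + length - 1) % len(relation)
--         relation.pop(idx)
--     return relation[0]
-- ===== Notes on version B (the rewrite author's own statement) =====
-- stated objective: simpler
-- what changed: Replaces A's three-branch slice-rotation elimination (pop-last / pop-first / rebuild the list from two slices, with a fixed 6-step for-loop) by the standard Josephus simulation: one moving index idx = (idx + length - 1) % len and a single pop per round of a while-loop.
import Mathlib
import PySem

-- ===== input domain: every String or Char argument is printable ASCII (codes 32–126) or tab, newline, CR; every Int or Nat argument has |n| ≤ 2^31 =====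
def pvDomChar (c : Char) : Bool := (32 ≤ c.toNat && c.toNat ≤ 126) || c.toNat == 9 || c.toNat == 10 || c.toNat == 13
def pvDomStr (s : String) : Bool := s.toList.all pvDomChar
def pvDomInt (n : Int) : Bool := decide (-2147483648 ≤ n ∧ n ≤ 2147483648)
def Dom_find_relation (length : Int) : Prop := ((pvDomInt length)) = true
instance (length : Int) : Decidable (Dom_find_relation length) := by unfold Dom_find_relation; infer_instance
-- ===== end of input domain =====

-- B replaces A's three-branch slice-rotation elimination by the standard single-index
-- Josephus simulation (simpler decomposition; return values proved equal everywhere).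

-- ===== PORT A =====
-- the for-x-in-range(6) loop: fuel counts remaining iterations, x is Python's loop variable
def find_relation_loop (length : Int) : Nat → Int → List String → Option String
  | 0, _, _ => none          -- loop ends, function falls off the end: Python returns None
  | fuel + 1, x, relation =>
    if relation.length = 1 then
      PySem.List.pyGet? relation 0
    else
      let temp := PySem.Int.mod length (6 - x)
      if temp = 0 then
        match PySem.List.pop? relation (-1) with   -- relation.pop()
        | some (_, rest) => find_relation_loop length fuel (x + 1) rest
        | none => none
      else if temp = 1 then
        match PySem.List.pop? relation 0 with      -- relation.pop(0)
        | some (_, rest) => find_relation_loop length fuel (x + 1) rest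
        | none => none
      else
        find_relation_loop length fuel (x + 1)
          (PySem.List.slice relation (some temp) none ++
           PySem.List.slice relation none (some (temp - 1)))

def find_relation (length : Int) : Option String :=
  find_relation_loop length 6 0 ["F", "L", "A", "M", "E", "S"]

-- ===== PORT B =====
-- while len(relation) > 1: idx = (idx + length - 1) % len(relation); relation.pop(idx)
-- (fuel = the initial list length only makes the while-loop total: each round pops one
-- element, so the real exit condition len > 1 always fires before the fuel runs out)
def find_relation_alt_loop (length : Int) : Nat → List String → Int → Option String
  | 0, relation, _ => PySem.List.pyGet? relation 0
  | fuel + 1, relation, idx =>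
    if relation.length > 1 then
      let idx' := PySem.Int.mod (idx + length - 1) (relation.length : Int)
      match PySem.List.pop? relation idx' with
      | some (_, rest) => find_relation_alt_loop length fuel rest idx'
      | none => none
    else
      PySem.List.pyGet? relation 0

def find_relation_alt (length : Int) : Option String :=
  find_relation_alt_loop length 6 ["F", "L", "A", "M", "E", "S"] 0

-- ===== PRECONDITION & SPEC =====
def Spec_find_relation (length : Int) (out : Option String) : Prop := out = find_relation_alt length
instance (length : Int) (out : Option String) : Decidable (Spec_find_relation length out) := by unfold Spec_find_relation; infer_instance

-- ===== CLAIM (what is proved, stated in full; the proofs are below) =====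
def Claim_equal_find_relation : Prop := ∀ (length : Int), Dom_find_relation length → Spec_find_relation length (find_relation length)

-- ===== LEMMAS AND PROOFS =====

-- both programs consume `length` only through `length % m` with m ∣ 60, so each depends
-- only on length % 60; that reduces the claim to the 60 residues, settled by decide.
theorem pv_mod_congr {l1 l2 m : Int} (hm : 0 < m) (hdvd : m ∣ 60)
    (h : PySem.Int.mod l1 60 = PySem.Int.mod l2 60) :
    PySem.Int.mod l1 m = PySem.Int.mod l2 m := by
  rw [PySem.Int.mod_eq_emod_of_pos (by norm_num : (0:Int) < 60),
      PySem.Int.mod_eq_emod_of_pos (by norm_num : (0:Int) < 60)] at h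
  rw [PySem.Int.mod_eq_emod_of_pos hm, PySem.Int.mod_eq_emod_of_pos hm]
  calc l1 % m = l1 % 60 % m := (Int.emod_emod_of_dvd _ hdvd).symm
    _ = l2 % 60 % m := by rw [h]
    _ = l2 % m := Int.emod_emod_of_dvd _ hdvd

theorem pv_mod_mod_60 (l : Int) :
    PySem.Int.mod l 60 = PySem.Int.mod (PySem.Int.mod l 60) 60 := by
  rw [PySem.Int.mod_eq_emod_of_pos (by norm_num : (0:Int) < 60),
      PySem.Int.mod_eq_emod_of_pos (by norm_num : (0:Int) < 60)]
  exact (Int.emod_emod_of_dvd l (dvd_refl 60)).symm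

theorem pv_loopA_congr (l1 l2 : Int)
    (h : PySem.Int.mod l1 60 = PySem.Int.mod l2 60) :
    ∀ (fuel : Nat) (x : Int) (rel : List String), x = 6 - (fuel : Int) → fuel ≤ 6 →
      find_relation_loop l1 fuel x rel = find_relation_loop l2 fuel x rel := by
  intro fuel
  induction fuel with
  | zero => intro x rel _ _; rfl
  | succ n ih =>
    intro x rel hx hle
    have hm : (0:Int) < 6 - x := by omega
    have hdvd : (6 - x) ∣ 60 := by
      have h6 : (6 : Int) - x = ((n : Int) + 1) := by omega
      rw [h6]
      have hn : n ≤ 5 := by omega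
      interval_cases n <;> decide
    have htemp : PySem.Int.mod l1 (6 - x) = PySem.Int.mod l2 (6 - x) :=
      pv_mod_congr hm hdvd h
    have hx' : x + 1 = 6 - (n : Int) := by omega
    simp only [find_relation_loop, htemp]
    split
    · rfl
    · split
      · cases PySem.List.pop? rel (-1) with
        | none => rfl
        | some r => exact ih (x + 1) r.2 hx' (by omega)
      · split
        · cases PySem.List.pop? rel 0 with
          | none => rfl
          | some r => exact ih (x + 1) r.2 hx' (by omega)
        · exact ih (x + 1) _ hx' (by omega)

theorem pv_loopB_congr (l1 l2 : Int)
    (h : PySem.Int.mod l1 60 = PySem.Int.mod l2 60) :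
    ∀ (fuel : Nat) (rel : List String) (idx : Int), rel.length ≤ 6 →
      find_relation_alt_loop l1 fuel rel idx = find_relation_alt_loop l2 fuel rel idx := by
  intro fuel
  induction fuel with
  | zero => intro rel idx _; rfl
  | succ n ih =>
    intro rel idx h6
    simp only [find_relation_alt_loop]
    split
    · next hgt =>
      have hm : (0:Int) < (rel.length : Int) := by exact_mod_cast Nat.lt_of_lt_of_le Nat.zero_lt_one hgt.le
      have hdvd : ((rel.length : Int)) ∣ 60 := by
        have h2 : 2 ≤ rel.length := hgt
        interval_cases h : rel.length <;> decide
      have hmodeq : PySem.Int.mod l1 (rel.length : Int) = PySem.Int.mod l2 (rel.length : Int) :=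
        pv_mod_congr hm hdvd h
      have hidx : PySem.Int.mod (idx + l1 - 1) (rel.length : Int)
          = PySem.Int.mod (idx + l2 - 1) (rel.length : Int) := by
        rw [PySem.Int.mod_eq_emod_of_pos hm] at hmodeq
        rw [PySem.Int.mod_eq_emod_of_pos hm] at hmodeq
        rw [PySem.Int.mod_eq_emod_of_pos hm, PySem.Int.mod_eq_emod_of_pos hm]
        have hME : l1 ≡ l2 [ZMOD (rel.length : Int)] := hmodeq
        exact Int.ModEq.sub_right 1 (Int.ModEq.add_left idx hME)
      rw [hidx]
      cases hpop : PySem.List.pop? rel (PySem.Int.mod (idx + l2 - 1) (rel.length : Int)) with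
      | none => rfl
      | some r =>
        have hlen := PySem.List.length_of_pop?_eq_some rel hpop
        exact ih r.2 _ (by omega)
    · rfl

theorem pv_A_mod (l : Int) : find_relation l = find_relation (PySem.Int.mod l 60) :=
  pv_loopA_congr l (PySem.Int.mod l 60) (pv_mod_mod_60 l) 6 0 _ (by norm_num) (by norm_num)

theorem pv_B_mod (l : Int) : find_relation_alt l = find_relation_alt (PySem.Int.mod l 60) :=
  pv_loopB_congr l (PySem.Int.mod l 60) (pv_mod_mod_60 l) 6 _ 0 (by norm_num)

theorem pv_residues : ∀ n : Fin 60, find_relation (n : Int) = find_relation_alt (n : Int) := by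
  decide

-- ===== VERDICT (by name: the statement is the Claim_ definition above) =====
theorem find_relation_spec : Claim_equal_find_relation := by
  intro length _
  show find_relation length = find_relation_alt length
  rw [pv_A_mod length, pv_B_mod length]
  have h0 : 0 ≤ PySem.Int.mod length 60 := PySem.Int.mod_nonneg length (by norm_num)
  have h1 : PySem.Int.mod length 60 < 60 := PySem.Int.mod_lt length (by norm_num)
  have h2 : find_relation (((PySem.Int.mod length 60).toNat : Nat) : Int)
      = find_relation_alt (((PySem.Int.mod length 60).toNat : Nat) : Int) :=
    pv_residues ⟨(PySem.Int.mod length 60).toNat, by omega⟩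
  rwa [Int.toNat_of_nonneg h0] at h2
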